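-- pv_equiv track=rewrite | github.com/codeflexi/th8-dcc-backend-v2 | app/api/decisions_v1.py | derive_risk_from_drivers
-- ===== SOURCE A (Python) =====
-- from typing import Dict, List, Any
--
-- RISK_PRIORITY = ["CRITICAL", "HIGH", "MEDIUM", "LOW"]
--
-- def derive_risk_from_drivers(drivers: List[Dict]) -> str:
--     if not drivers:
--         return "LOW"
--     impacts = [d["impact"] for d in drivers]
--     for p in RISK_PRIORITY:
--         if p in impacts:
--             return p
--     return "LOW"
-- ===== SOURCE B (Python) =====
-- RISK_PRIORITY = ["CRITICAL", "HIGH", "MEDIUM", "LOW"]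
--
-- def derive_risk_from_drivers(drivers):
--     rank = {p: i for i, p in enumerate(RISK_PRIORITY)}
--     best = len(RISK_PRIORITY)
--     for d in drivers:
--         best = min(best, rank.get(d["impact"], len(RISK_PRIORITY)))
--     return RISK_PRIORITY[best] if best < len(RISK_PRIORITY) else "LOW"
-- ===== Notes on version B (the rewrite author's own statement) =====
-- stated objective: alternative
-- what changed: Replaces the priority-by-priority membership scan over the impacts list with a single pass over drivers that keeps the minimum rank looked up in a dict built from RISK_PRIORITY.
import Mathlib
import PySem

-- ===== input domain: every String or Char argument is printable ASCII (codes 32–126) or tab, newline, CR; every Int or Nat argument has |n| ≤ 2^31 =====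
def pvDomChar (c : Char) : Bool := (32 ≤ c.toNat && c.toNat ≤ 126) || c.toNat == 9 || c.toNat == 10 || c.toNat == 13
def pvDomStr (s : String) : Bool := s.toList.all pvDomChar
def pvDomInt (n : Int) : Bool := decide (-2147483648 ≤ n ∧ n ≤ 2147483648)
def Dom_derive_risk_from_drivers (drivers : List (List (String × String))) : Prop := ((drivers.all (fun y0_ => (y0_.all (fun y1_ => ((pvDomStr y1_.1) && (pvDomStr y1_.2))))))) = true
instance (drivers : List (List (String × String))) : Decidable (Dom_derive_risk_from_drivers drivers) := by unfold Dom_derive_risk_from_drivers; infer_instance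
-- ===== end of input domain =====

-- B replaces A's priority-by-priority membership scan with one pass over drivers keeping the minimum rank (alternative algorithm, not claimed faster).


-- ===== PORT A =====
def RISK_PRIORITY : List String := ["CRITICAL", "HIGH", "MEDIUM", "LOW"]

-- 'for p in RISK_PRIORITY: if p in impacts: return p' / 'return "LOW"'
def pvScanA (impacts : List String) : List String → String
  | [] => "LOW"
  | p :: ps => if impacts.contains p then p else pvScanA impacts ps

def derive_risk_from_drivers (drivers : List (List (String × String))) : String :=
  if drivers = [] then "LOW"
  else
    -- d["impact"]: Pre_ guarantees the key is present (else Python raises KeyError)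
    let impacts := drivers.map (fun d => ((PySem.Dict.mk d).get? "impact").getD "")
    pvScanA impacts RISK_PRIORITY

-- ===== PORT B =====
def pvRankB : PySem.Dict String Int :=
  (PySem.List.enumerate RISK_PRIORITY 0).foldl (fun d ip => d.insert ip.2 ip.1) PySem.Dict.empty

def derive_risk_from_drivers_alt (drivers : List (List (String × String))) : String :=
  let n : Int := (RISK_PRIORITY.length : Int)
  let best : Int :=
    drivers.foldl
      (fun best d => min best (pvRankB.getD (((PySem.Dict.mk d).get? "impact").getD "") n)) n
  if best < n then (PySem.List.pyGet? RISK_PRIORITY best).getD "LOW" else "LOW"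

-- ===== PRECONDITION & SPEC =====
-- Pre_ excludes drivers lacking the "impact" key, on which Python A (and B) raise KeyError.
def Pre_derive_risk_from_drivers (drivers : List (List (String × String))) : Prop :=
  ∀ d ∈ drivers, "impact" ∈ d.map Prod.fst
instance (drivers : List (List (String × String))) : Decidable (Pre_derive_risk_from_drivers drivers) := by
  unfold Pre_derive_risk_from_drivers; infer_instance

def pvWitness_derive_risk_from_drivers : (List (List (String × String))) :=
  [[("impact", "HIGH")], [("impact", "weird")]]

def Spec_derive_risk_from_drivers (drivers : List (List (String × String))) (out : String) : Prop := out = derive_risk_from_drivers_alt drivers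
instance (drivers : List (List (String × String))) (out : String) : Decidable (Spec_derive_risk_from_drivers drivers out) := by unfold Spec_derive_risk_from_drivers; infer_instance

-- ===== CLAIM (what is proved, stated in full; the proofs are below) =====
def Claim_equal_derive_risk_from_drivers : Prop := ∀ (drivers : List (List (String × String))), Dom_derive_risk_from_drivers drivers → Pre_derive_risk_from_drivers drivers → Spec_derive_risk_from_drivers drivers (derive_risk_from_drivers drivers)

-- ===== LEMMAS AND PROOFS =====

-- rank of an impact string, as an if-chain
def pvR (s : String) : Int :=
  if s = "CRITICAL" then 0 else if s = "HIGH" then 1 else if s = "MEDIUM" then 2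
  else if s = "LOW" then 3 else 4

lemma pvR_bounds (s : String) : 0 ≤ pvR s ∧ pvR s ≤ 4 := by
  simp only [pvR]; split_ifs <;> norm_num

lemma pvRankB_getD (s : String) : pvRankB.getD s 4 = pvR s := by
  simp only [pvRankB, RISK_PRIORITY, PySem.List.enumerate_cons, PySem.List.enumerate_nil,
    List.foldl]
  simp only [PySem.Dict.getD_eq_get?_getD]
  rw [PySem.Dict.get?_insert, PySem.Dict.get?_insert, PySem.Dict.get?_insert,
    PySem.Dict.get?_insert]
  simp [pvR, PySem.Dict.get?_empty]
  split_ifs <;> simp_all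

-- minimum rank of a list of impacts
def pvM : List String → Int
  | [] => 4
  | s :: t => min (pvR s) (pvM t)

-- the impact extracted from one driver dict
def pvImp (d : List (String × String)) : String := ((PySem.Dict.mk d).get? "impact").getD ""

lemma pvM_bounds (xs : List String) : 0 ≤ pvM xs ∧ pvM xs ≤ 4 := by
  induction xs with
  | nil => simp [pvM]
  | cons s t ih => have := pvR_bounds s; simp only [pvM]; omega

lemma pvFold_min (l : List (List (String × String))) (acc : Int) (h : acc ≤ 4) :
    l.foldl (fun b d => min b (pvR (pvImp d))) acc = min acc (pvM (l.map pvImp)) := by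
  induction l generalizing acc with
  | nil => simp [pvM]; omega
  | cons d t ih =>
    have hb := pvR_bounds (pvImp d)
    simp only [List.foldl, List.map, pvM]
    rw [ih (min acc (pvR (pvImp d))) (by omega), min_assoc]

lemma pvM_le_iff (xs : List String) (k : Int) :
    pvM xs ≤ k ↔ (4 ≤ k ∨ ∃ p ∈ xs, pvR p ≤ k) := by
  induction xs with
  | nil => simp [pvM]
  | cons s t ih =>
    simp only [pvM, List.mem_cons, min_le_iff, ih]
    constructor
    · rintro (hs | h4 | ⟨p, hp, hle⟩)
      · exact Or.inr ⟨s, Or.inl rfl, hs⟩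
      · exact Or.inl h4
      · exact Or.inr ⟨p, Or.inr hp, hle⟩
    · rintro (h4 | ⟨p, (rfl | hp), hle⟩)
      · exact Or.inl (le_trans (pvR_bounds s).2 h4)
      · exact Or.inl hle
      · exact Or.inr (Or.inr ⟨p, hp, hle⟩)

lemma pvM_mem_le {p : String} {xs : List String} (hp : p ∈ xs) : pvM xs ≤ pvR p :=
  (pvM_le_iff xs (pvR p)).mpr (Or.inr ⟨p, hp, le_rfl⟩)

lemma pvR_le_zero (p : String) : pvR p ≤ 0 ↔ p = "CRITICAL" := by
  simp only [pvR]; split_ifs <;> simp_all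

lemma pvR_le_one (p : String) : pvR p ≤ 1 ↔ p = "CRITICAL" ∨ p = "HIGH" := by
  simp only [pvR]; split_ifs <;> simp_all

lemma pvR_le_two (p : String) : pvR p ≤ 2 ↔ p = "CRITICAL" ∨ p = "HIGH" ∨ p = "MEDIUM" := by
  simp only [pvR]; split_ifs <;> simp_all

lemma pvR_le_three (p : String) :
    pvR p ≤ 3 ↔ p = "CRITICAL" ∨ p = "HIGH" ∨ p = "MEDIUM" ∨ p = "LOW" := by
  simp only [pvR]; split_ifs <;> simp_all

lemma pvNotMem {p : String} {xs : List String} (h : ¬ pvM xs ≤ pvR p) : p ∉ xs :=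
  fun hx => h (pvM_mem_le hx)

-- the core: A's scan equals B's rank-indexed result, on the impacts list
lemma pvScan_eq (xs : List String) :
    pvScanA xs RISK_PRIORITY =
      (if pvM xs < 4 then (PySem.List.pyGet? RISK_PRIORITY (pvM xs)).getD "LOW" else "LOW") := by
  obtain ⟨hlo, hhi⟩ := pvM_bounds xs
  simp only [RISK_PRIORITY, pvScanA]
  have hrC : pvR "CRITICAL" = 0 := by simp [pvR]
  have hrH : pvR "HIGH" = 1 := by simp [pvR]
  have hrM : pvR "MEDIUM" = 2 := by simp [pvR]
  have hrL : pvR "LOW" = 3 := by simp [pvR]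
  interval_cases h : pvM xs
  · have hC : "CRITICAL" ∈ xs := by
      rcases (pvM_le_iff xs 0).mp (by omega) with h4 | ⟨p, hp, hle⟩
      · omega
      · rcases (pvR_le_zero p).mp hle with rfl; exact hp
    simp [hC]
  · have hC : "CRITICAL" ∉ xs := pvNotMem (by rw [hrC]; omega)
    have hH : "HIGH" ∈ xs := by
      rcases (pvM_le_iff xs 1).mp (by omega) with h4 | ⟨p, hp, hle⟩
      · omega
      · rcases (pvR_le_one p).mp hle with rfl | rfl
        · exact absurd hp hC
        · exact hp
    simp [hC, hH]
  · have hC : "CRITICAL" ∉ xs := pvNotMem (by rw [hrC]; omega)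
    have hH : "HIGH" ∉ xs := pvNotMem (by rw [hrH]; omega)
    have hM : "MEDIUM" ∈ xs := by
      rcases (pvM_le_iff xs 2).mp (by omega) with h4 | ⟨p, hp, hle⟩
      · omega
      · rcases (pvR_le_two p).mp hle with rfl | rfl | rfl
        · exact absurd hp hC
        · exact absurd hp hH
        · exact hp
    simp [hC, hH, hM]
  · have hC : "CRITICAL" ∉ xs := pvNotMem (by rw [hrC]; omega)
    have hH : "HIGH" ∉ xs := pvNotMem (by rw [hrH]; omega)
    have hM : "MEDIUM" ∉ xs := pvNotMem (by rw [hrM]; omega)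
    have hL : "LOW" ∈ xs := by
      rcases (pvM_le_iff xs 3).mp (by omega) with h4 | ⟨p, hp, hle⟩
      · omega
      · rcases (pvR_le_three p).mp hle with rfl | rfl | rfl | rfl
        · exact absurd hp hC
        · exact absurd hp hH
        · exact absurd hp hM
        · exact hp
    simp [hC, hH, hM, hL]
  · have hC : "CRITICAL" ∉ xs := pvNotMem (by rw [hrC]; omega)
    have hH : "HIGH" ∉ xs := pvNotMem (by rw [hrH]; omega)
    have hM : "MEDIUM" ∉ xs := pvNotMem (by rw [hrM]; omega)
    have hL : "LOW" ∉ xs := pvNotMem (by rw [hrL]; omega)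
    simp [hC, hH, hM, hL]

-- ===== VERDICT (by name: the statement is the Claim_ definition above) =====
theorem derive_risk_from_drivers_spec : Claim_equal_derive_risk_from_drivers := by
  intro drivers _ _
  unfold Spec_derive_risk_from_drivers derive_risk_from_drivers derive_risk_from_drivers_alt
  have h4 : ((RISK_PRIORITY.length : Nat) : Int) = 4 := by norm_num [RISK_PRIORITY]
  simp only [h4]
  rw [show (fun (best : Int) (d : List (String × String)) =>
        min best (pvRankB.getD (((PySem.Dict.mk d).get? "impact").getD "") 4))
      = (fun b d => min b (pvR (pvImp d))) from by
        funext b d; rw [pvRankB_getD]; rfl]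
  rw [pvFold_min drivers 4 le_rfl]
  obtain ⟨hlo, hhi⟩ := pvM_bounds (drivers.map pvImp)
  rw [show min (4 : Int) (pvM (drivers.map pvImp)) = pvM (drivers.map pvImp) from by omega]
  cases drivers with
  | nil => simp [pvM]
  | cons d t =>
    simp only [if_neg (List.cons_ne_nil d t)]
    rw [show (fun (d : List (String × String)) => ((PySem.Dict.mk d).get? "impact").getD "")
        = pvImp from rfl]
    exact pvScan_eq ((d :: t).map pvImp)
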